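-- pv_equiv track=rewrite | github.com/LuukHAN/AdventOfCode | 2024/Dag_5/Dag5p1v1.py | loop_through_lines
-- ===== SOURCE A (Python) =====
-- def loop_through_lines(input_data):
--     rules = []
--     page_orders = []
--     is_rule = True
--     for line in input_data:
--         if line == '':
--             is_rule = False
--         else:
--             if is_rule:
--                 rules.append(line.split('|'))
--             else:
--                 page_orders.append(line.split(','))
--     return rules, page_orders
-- ===== SOURCE B (Python) =====
-- def loop_through_lines(input_data):
--     lines = list(input_data)
--     try:
--         i = lines.index('')
--     except ValueError:
--         i = len(lines)
--     rules = [line.split('|') for line in lines[:i]]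
--     page_orders = [line.split(',') for line in lines[i + 1:] if line != '']
--     return rules, page_orders
-- ===== Notes on version B (the rewrite author's own statement) =====
-- stated objective: simpler
-- what changed: B replaces A's one-pass loop with a threaded boolean flag by locating the first blank line once, slicing the list into head/tail, and mapping a split over each half (filtering blanks in the tail).
import Mathlib
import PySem

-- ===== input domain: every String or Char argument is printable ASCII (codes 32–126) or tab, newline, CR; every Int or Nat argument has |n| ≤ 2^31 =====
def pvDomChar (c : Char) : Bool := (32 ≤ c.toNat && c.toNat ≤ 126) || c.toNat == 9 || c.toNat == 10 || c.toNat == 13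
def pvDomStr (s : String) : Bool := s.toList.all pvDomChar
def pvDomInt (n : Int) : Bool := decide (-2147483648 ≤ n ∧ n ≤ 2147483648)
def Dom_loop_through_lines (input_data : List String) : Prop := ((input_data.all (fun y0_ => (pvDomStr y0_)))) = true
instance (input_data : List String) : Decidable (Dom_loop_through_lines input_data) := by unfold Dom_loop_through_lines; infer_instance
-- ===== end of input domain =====

-- B finds the first blank line once and slices, instead of A's one-pass loop with a boolean flag; objective: simpler.

-- s.split(sep) for the non-empty literal separators used here; split? is some for sep ≠ ""
def pySplit (s sep : String) : List String := (PySem.Str.split? s sep).getD []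

-- ===== PORT A =====
-- the for-loop of A, as accumulator-passing recursion over the same state (rules, page_orders, is_rule)
def loopA : List String → List (List String) → List (List String) → Bool → List (List String) × List (List String)
  | [], rules, page_orders, _ => (rules, page_orders)
  | line :: rest, rules, page_orders, is_rule =>
      if line = "" then loopA rest rules page_orders false
      else if is_rule then loopA rest (rules ++ [pySplit line "|"]) page_orders is_rule
      else loopA rest rules (page_orders ++ [pySplit line ","]) is_rule

def loop_through_lines (input_data : List String) : List (List String) × List (List String) :=
  loopA input_data [] [] true

-- ===== PORT B =====
def loop_through_lines_alt (input_data : List String) : List (List String) × List (List String) :=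
  let i := match input_data.findIdx? (· == "") with
           | some j => j
           | none => input_data.length
  ((input_data.take i).map (fun line => pySplit line "|"),
   ((input_data.drop (i + 1)).filter (fun line => line ≠ "")).map (fun line => pySplit line ","))

-- ===== PRECONDITION & SPEC =====
def Spec_loop_through_lines (input_data : List String) (out : List (List String) × List (List String)) : Prop := out = loop_through_lines_alt input_data
instance (input_data : List String) (out : List (List String) × List (List String)) : Decidable (Spec_loop_through_lines input_data out) := by unfold Spec_loop_through_lines; infer_instance

-- ===== CLAIM (what is proved, stated in full; the proofs are below) =====
def Claim_equal_loop_through_lines : Prop := ∀ (input_data : List String), Dom_loop_through_lines input_data → Spec_loop_through_lines input_data (loop_through_lines input_data)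

-- ===== LEMMAS AND PROOFS =====

-- after the first blank line A only ever appends comma-splits of non-blank lines
theorem loopA_false (xs : List String) : ∀ (rules page_orders : List (List String)),
    loopA xs rules page_orders false
      = (rules, page_orders ++ (xs.filter (fun line => line ≠ "")).map (fun line => pySplit line ",")) := by
  induction xs with
  | nil => intro rules page_orders; simp [loopA]
  | cons l rest ih =>
      intro rules page_orders
      by_cases h : l = "" <;> simp [loopA, h, ih]

-- while the flag is still true, A's result is B's halves appended to the accumulators
theorem loopA_true (xs : List String) : ∀ (rules page_orders : List (List String)),
    loopA xs rules page_orders true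
      = (rules ++ (loop_through_lines_alt xs).1, page_orders ++ (loop_through_lines_alt xs).2) := by
  induction xs with
  | nil => intro rules page_orders; simp [loopA, loop_through_lines_alt]
  | cons l rest ih =>
      intro rules page_orders
      by_cases h : l = ""
      · subst h
        simp [loopA, loopA_false, loop_through_lines_alt, List.findIdx?_cons]
      · rw [show loopA (l :: rest) rules page_orders true
              = loopA rest (rules ++ [pySplit l "|"]) page_orders true by simp [loopA, h]]
        rw [ih]
        unfold loop_through_lines_alt
        rw [List.findIdx?_cons]
        simp only [beq_iff_eq, h, if_false]
        cases hf : rest.findIdx? (· == "") with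
        | none => simp
        | some j => simp [List.take_succ_cons, List.drop_succ_cons]

-- ===== VERDICT (by name: the statement is the Claim_ definition above) =====
theorem loop_through_lines_spec : Claim_equal_loop_through_lines := by
  intro input_data _
  unfold Spec_loop_through_lines loop_through_lines
  rw [loopA_true]
  simp
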